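-- pv_equiv track=rewrite | github.com/kobashigawa/mestrado | ordem-inventada/ordem_invent_todos_objetos.py | troca_numero_classe
-- ===== SOURCE A (Python) =====
-- def troca_numero_classe(lista):
--     ''' recebe uma lista com os numeros dos objetos e substitui pela respectivo
--     nome da classe, vai ter q ser na mao, nao tem jeito'''
--
--     lista = [int(i) for i in lista]
--     index = 0
--
--     for a in lista:
--         if type(a) == int:
--             if a >= 1 and a <= 20:
--                 lista[index] =  'humano'
--             if a >= 21 and a <= 40:
--                 lista[index] =  'copo'
--             if a >= 41 and a <= 60:
--                 lista[index] =  'oculos'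
--             if a >= 61 and a <= 80:
--                 lista[index] =  'aviao'
--             if a >= 81 and a <= 100:
--                 lista[index] =  'formiga'
--             if a >= 101 and a <= 120:
--                 lista[index] =  'cadeira'
--             if a >= 121 and a <= 140:
--                 lista[index] =  'polvo'
--             if a >= 141 and a <= 160:
--                 lista[index] =  'mesa'
--             if a >= 161 and a <= 180:
--                 lista[index] =  'ursinho'
--             if a >= 181 and a <= 200:
--                 lista[index] =  'mao'
--             if a >= 201 and a <= 220:
--                 lista[index] =  'alicate'
--             if a >= 221 and a <= 240:
--                   lista[index] =  'peixe'
--             if a >= 241 and a <= 260: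
--                 lista[index] =  'passaro'
--             if a >= 261 and a <= 280:
--                 lista[index] =  'tatu'
--             if a >= 281 and a <= 300:
--                 lista[index] =  'dorso'
--             if a >= 301 and a <= 320:
--                 lista[index] =  'mecha'
--             if a >= 321 and a <= 340:
--                 lista[index] =  'rolamento'
--             if a >= 341 and a <= 360:
--                 lista[index] =  'vaso'
--             if a >= 361 and a <= 380:
--                 lista[index] =  'quadrupede'
--
--             index = index + 1
--
--
--     return lista
-- ===== SOURCE B (Python) =====
-- NAMES = ['humano', 'copo', 'oculos', 'aviao', 'formiga', 'cadeira', 'polvo',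
--          'mesa', 'ursinho', 'mao', 'alicate', 'peixe', 'passaro', 'tatu',
--          'dorso', 'mecha', 'rolamento', 'vaso', 'quadrupede']
--
--
-- def troca_numero_classe(lista):
--     lista = [int(i) for i in lista]
--     out = []
--     for a in lista:
--         idx = (a - 1) // 20
--         out.append(NAMES[idx] if 0 <= idx < 19 else a)
--     return out
-- ===== Notes on version B (the rewrite author's own statement) =====
-- stated objective: simpler
-- what changed: Replaces the 19 chained range-test ifs and in-place list rewriting with a single arithmetic index (a-1)//20 into a 19-element names table, building a fresh output list.
-- outside the precondition, e.g. on troca_numero_classe([0]): A returns [0], B returns [0]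
import Mathlib
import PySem

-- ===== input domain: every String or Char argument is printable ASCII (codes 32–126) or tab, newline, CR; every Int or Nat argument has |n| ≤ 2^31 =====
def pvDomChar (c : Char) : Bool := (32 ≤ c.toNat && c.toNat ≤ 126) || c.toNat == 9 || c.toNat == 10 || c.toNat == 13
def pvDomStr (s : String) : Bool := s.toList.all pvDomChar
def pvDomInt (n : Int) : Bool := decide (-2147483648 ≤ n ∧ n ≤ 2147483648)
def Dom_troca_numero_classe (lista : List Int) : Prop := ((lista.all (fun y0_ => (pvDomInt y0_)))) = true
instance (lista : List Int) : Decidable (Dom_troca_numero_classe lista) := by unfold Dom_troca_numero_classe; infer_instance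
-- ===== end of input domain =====

-- B replaces A's 19 chained range tests by one arithmetic table lookup (a-1)//20; objective: simpler.
-- Return-value equivalence only; neither version mutates its argument (A rebinds a fresh list).

-- ===== PORT A =====
-- Per-element body of A's loop: the 19 sequential ifs, each overwriting the slot, in source order.
-- Under Pre_ some branch fires; outside Pre_ Python leaves the int in the list (not a String) — "" stands in there.
def pvClassA (a : Int) : String :=
  let r : Option String := none
  let r := if a ≥ 1 ∧ a ≤ 20 then some "humano" else r
  let r := if a ≥ 21 ∧ a ≤ 40 then some "copo" else r
  let r := if a ≥ 41 ∧ a ≤ 60 then some "oculos" else r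
  let r := if a ≥ 61 ∧ a ≤ 80 then some "aviao" else r
  let r := if a ≥ 81 ∧ a ≤ 100 then some "formiga" else r
  let r := if a ≥ 101 ∧ a ≤ 120 then some "cadeira" else r
  let r := if a ≥ 121 ∧ a ≤ 140 then some "polvo" else r
  let r := if a ≥ 141 ∧ a ≤ 160 then some "mesa" else r
  let r := if a ≥ 161 ∧ a ≤ 180 then some "ursinho" else r
  let r := if a ≥ 181 ∧ a ≤ 200 then some "mao" else r
  let r := if a ≥ 201 ∧ a ≤ 220 then some "alicate" else r
  let r := if a ≥ 221 ∧ a ≤ 240 then some "peixe" else r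
  let r := if a ≥ 241 ∧ a ≤ 260 then some "passaro" else r
  let r := if a ≥ 261 ∧ a ≤ 280 then some "tatu" else r
  let r := if a ≥ 281 ∧ a ≤ 300 then some "dorso" else r
  let r := if a ≥ 301 ∧ a ≤ 320 then some "mecha" else r
  let r := if a ≥ 321 ∧ a ≤ 340 then some "rolamento" else r
  let r := if a ≥ 341 ∧ a ≤ 360 then some "vaso" else r
  let r := if a ≥ 361 ∧ a ≤ 380 then some "quadrupede" else r
  r.getD ""

def troca_numero_classe (lista : List Int) : List String :=
  lista.map pvClassA

-- ===== PORT B =====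
def pvNames : List String :=
  ["humano", "copo", "oculos", "aviao", "formiga", "cadeira", "polvo",
   "mesa", "ursinho", "mao", "alicate", "peixe", "passaro", "tatu",
   "dorso", "mecha", "rolamento", "vaso", "quadrupede"]

-- Per-element body of B's loop; outside Pre_ (idx out of 0..18) Python B keeps the int,
-- which is not a String — its decimal string stands in there (outside Pre_, nothing claimed).
def pvClassB (a : Int) : String :=
  let idx := PySem.Int.floordiv (a - 1) 20
  if 0 ≤ idx ∧ idx < 19 then (PySem.List.pyGet? pvNames idx).getD "" else PySem.Int.toStr a

def troca_numero_classe_alt (lista : List Int) : List String :=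
  lista.map pvClassB

-- ===== PRECONDITION & SPEC =====
-- Pre_ excludes lists with an element outside 1..380: there both Pythons keep the original int
-- in the result, which is not a value of the declared List String type.
def Pre_troca_numero_classe (lista : List Int) : Prop :=
  (lista.all (fun a => 1 ≤ a && a ≤ 380)) = true
instance (lista : List Int) : Decidable (Pre_troca_numero_classe lista) := by
  unfold Pre_troca_numero_classe; infer_instance
def pvWitness_troca_numero_classe : List Int := [1, 35, 200, 380]

def Spec_troca_numero_classe (lista : List Int) (out : List String) : Prop := out = troca_numero_classe_alt lista
instance (lista : List Int) (out : List String) : Decidable (Spec_troca_numero_classe lista out) := by unfold Spec_troca_numero_classe; infer_instance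

-- ===== CLAIM (what is proved, stated in full; the proofs are below) =====
def Claim_equal_troca_numero_classe : Prop := ∀ (lista : List Int), Dom_troca_numero_classe lista → Pre_troca_numero_classe lista → Spec_troca_numero_classe lista (troca_numero_classe lista)

-- ===== LEMMAS AND PROOFS =====
lemma pvClass_eq (a : Int) (h1 : 1 ≤ a) (h2 : a ≤ 380) : pvClassA a = pvClassB a := by
  have hdiv : PySem.Int.floordiv (a - 1) 20 = (a - 1) / 20 :=
    PySem.Int.floordiv_eq_ediv_of_pos (by omega)
  have hband : (1 ≤ a ∧ a ≤ 20) ∨ (21 ≤ a ∧ a ≤ 40) ∨ (41 ≤ a ∧ a ≤ 60) ∨ (61 ≤ a ∧ a ≤ 80) ∨ (81 ≤ a ∧ a ≤ 100) ∨ (101 ≤ a ∧ a ≤ 120) ∨ (121 ≤ a ∧ a ≤ 140) ∨ (141 ≤ a ∧ a ≤ 160) ∨ (161 ≤ a ∧ a ≤ 180) ∨ (181 ≤ a ∧ a ≤ 200) ∨ (201 ≤ a ∧ a ≤ 220) ∨ (221 ≤ a ∧ a ≤ 240) ∨ (241 ≤ a ∧ a ≤ 260) ∨ (261 ≤ a ∧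 a ≤ 280) ∨ (281 ≤ a ∧ a ≤ 300) ∨ (301 ≤ a ∧ a ≤ 320) ∨ (321 ≤ a ∧ a ≤ 340) ∨ (341 ≤ a ∧ a ≤ 360) ∨ (361 ≤ a ∧ a ≤ 380) := by omega
  rcases hband with h|h|h|h|h|h|h|h|h|h|h|h|h|h|h|h|h|h|h
  · simp only [pvClassA, pvClassB, hdiv, show (a-1)/20 = (0:Int) from by omega]
    rw [if_neg (show ¬(a ≥ 361 ∧ a ≤ 380) from by omega)]
    rw [if_neg (show ¬(a ≥ 341 ∧ a ≤ 360) from by omega)]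
    rw [if_neg (show ¬(a ≥ 321 ∧ a ≤ 340) from by omega)]
    rw [if_neg (show ¬(a ≥ 301 ∧ a ≤ 320) from by omega)]
    rw [if_neg (show ¬(a ≥ 281 ∧ a ≤ 300) from by omega)]
    rw [if_neg (show ¬(a ≥ 261 ∧ a ≤ 280) from by omega)]
    rw [if_neg (show ¬(a ≥ 241 ∧ a ≤ 260) from by omega)]
    rw [if_neg (show ¬(a ≥ 221 ∧ a ≤ 240) from by omega)]
    rw [if_neg (show ¬(a ≥ 201 ∧ a ≤ 220) from by omega)]
    rw [if_neg (show ¬(a ≥ 181 ∧ a ≤ 200) from by omega)]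
    rw [if_neg (show ¬(a ≥ 161 ∧ a ≤ 180) from by omega)]
    rw [if_neg (show ¬(a ≥ 141 ∧ a ≤ 160) from by omega)]
    rw [if_neg (show ¬(a ≥ 121 ∧ a ≤ 140) from by omega)]
    rw [if_neg (show ¬(a ≥ 101 ∧ a ≤ 120) from by omega)]
    rw [if_neg (show ¬(a ≥ 81 ∧ a ≤ 100) from by omega)]
    rw [if_neg (show ¬(a ≥ 61 ∧ a ≤ 80) from by omega)]
    rw [if_neg (show ¬(a ≥ 41 ∧ a ≤ 60) from by omega)]
    rw [if_neg (show ¬(a ≥ 21 ∧ a ≤ 40) from by omega)]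
    rw [if_pos (show a ≥ 1 ∧ a ≤ 20 from by omega), if_pos (show (0:Int) ≤ (0:Int) ∧ (0:Int) < 19 from by decide)]
    rfl
  · simp only [pvClassA, pvClassB, hdiv, show (a-1)/20 = (1:Int) from by omega]
    rw [if_neg (show ¬(a ≥ 361 ∧ a ≤ 380) from by omega)]
    rw [if_neg (show ¬(a ≥ 341 ∧ a ≤ 360) from by omega)]
    rw [if_neg (show ¬(a ≥ 321 ∧ a ≤ 340) from by omega)]
    rw [if_neg (show ¬(a ≥ 301 ∧ a ≤ 320) from by omega)]
    rw [if_neg (show ¬(a ≥ 281 ∧ a ≤ 300) from by omega)]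
    rw [if_neg (show ¬(a ≥ 261 ∧ a ≤ 280) from by omega)]
    rw [if_neg (show ¬(a ≥ 241 ∧ a ≤ 260) from by omega)]
    rw [if_neg (show ¬(a ≥ 221 ∧ a ≤ 240) from by omega)]
    rw [if_neg (show ¬(a ≥ 201 ∧ a ≤ 220) from by omega)]
    rw [if_neg (show ¬(a ≥ 181 ∧ a ≤ 200) from by omega)]
    rw [if_neg (show ¬(a ≥ 161 ∧ a ≤ 180) from by omega)]
    rw [if_neg (show ¬(a ≥ 141 ∧ a ≤ 160) from by omega)]
    rw [if_neg (show ¬(a ≥ 121 ∧ a ≤ 140) from by omega)]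
    rw [if_neg (show ¬(a ≥ 101 ∧ a ≤ 120) from by omega)]
    rw [if_neg (show ¬(a ≥ 81 ∧ a ≤ 100) from by omega)]
    rw [if_neg (show ¬(a ≥ 61 ∧ a ≤ 80) from by omega)]
    rw [if_neg (show ¬(a ≥ 41 ∧ a ≤ 60) from by omega)]
    rw [if_pos (show a ≥ 21 ∧ a ≤ 40 from by omega), if_pos (show (0:Int) ≤ (1:Int) ∧ (1:Int) < 19 from by decide)]
    rfl
  · simp only [pvClassA, pvClassB, hdiv, show (a-1)/20 = (2:Int) from by omega]
    rw [if_neg (show ¬(a ≥ 361 ∧ a ≤ 380) from by omega)]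
    rw [if_neg (show ¬(a ≥ 341 ∧ a ≤ 360) from by omega)]
    rw [if_neg (show ¬(a ≥ 321 ∧ a ≤ 340) from by omega)]
    rw [if_neg (show ¬(a ≥ 301 ∧ a ≤ 320) from by omega)]
    rw [if_neg (show ¬(a ≥ 281 ∧ a ≤ 300) from by omega)]
    rw [if_neg (show ¬(a ≥ 261 ∧ a ≤ 280) from by omega)]
    rw [if_neg (show ¬(a ≥ 241 ∧ a ≤ 260) from by omega)]
    rw [if_neg (show ¬(a ≥ 221 ∧ a ≤ 240) from by omega)]
    rw [if_neg (show ¬(a ≥ 201 ∧ a ≤ 220) from by omega)]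
    rw [if_neg (show ¬(a ≥ 181 ∧ a ≤ 200) from by omega)]
    rw [if_neg (show ¬(a ≥ 161 ∧ a ≤ 180) from by omega)]
    rw [if_neg (show ¬(a ≥ 141 ∧ a ≤ 160) from by omega)]
    rw [if_neg (show ¬(a ≥ 121 ∧ a ≤ 140) from by omega)]
    rw [if_neg (show ¬(a ≥ 101 ∧ a ≤ 120) from by omega)]
    rw [if_neg (show ¬(a ≥ 81 ∧ a ≤ 100) from by omega)]
    rw [if_neg (show ¬(a ≥ 61 ∧ a ≤ 80) from by omega)]
    rw [if_pos (show a ≥ 41 ∧ a ≤ 60 from by omega), if_pos (show (0:Int) ≤ (2:Int) ∧ (2:Int) < 19 from by decide)]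
    rfl
  · simp only [pvClassA, pvClassB, hdiv, show (a-1)/20 = (3:Int) from by omega]
    rw [if_neg (show ¬(a ≥ 361 ∧ a ≤ 380) from by omega)]
    rw [if_neg (show ¬(a ≥ 341 ∧ a ≤ 360) from by omega)]
    rw [if_neg (show ¬(a ≥ 321 ∧ a ≤ 340) from by omega)]
    rw [if_neg (show ¬(a ≥ 301 ∧ a ≤ 320) from by omega)]
    rw [if_neg (show ¬(a ≥ 281 ∧ a ≤ 300) from by omega)]
    rw [if_neg (show ¬(a ≥ 261 ∧ a ≤ 280) from by omega)]
    rw [if_neg (show ¬(a ≥ 241 ∧ a ≤ 260) from by omega)]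
    rw [if_neg (show ¬(a ≥ 221 ∧ a ≤ 240) from by omega)]
    rw [if_neg (show ¬(a ≥ 201 ∧ a ≤ 220) from by omega)]
    rw [if_neg (show ¬(a ≥ 181 ∧ a ≤ 200) from by omega)]
    rw [if_neg (show ¬(a ≥ 161 ∧ a ≤ 180) from by omega)]
    rw [if_neg (show ¬(a ≥ 141 ∧ a ≤ 160) from by omega)]
    rw [if_neg (show ¬(a ≥ 121 ∧ a ≤ 140) from by omega)]
    rw [if_neg (show ¬(a ≥ 101 ∧ a ≤ 120) from by omega)]
    rw [if_neg (show ¬(a ≥ 81 ∧ a ≤ 100) from by omega)]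
    rw [if_pos (show a ≥ 61 ∧ a ≤ 80 from by omega), if_pos (show (0:Int) ≤ (3:Int) ∧ (3:Int) < 19 from by decide)]
    rfl
  · simp only [pvClassA, pvClassB, hdiv, show (a-1)/20 = (4:Int) from by omega]
    rw [if_neg (show ¬(a ≥ 361 ∧ a ≤ 380) from by omega)]
    rw [if_neg (show ¬(a ≥ 341 ∧ a ≤ 360) from by omega)]
    rw [if_neg (show ¬(a ≥ 321 ∧ a ≤ 340) from by omega)]
    rw [if_neg (show ¬(a ≥ 301 ∧ a ≤ 320) from by omega)]
    rw [if_neg (show ¬(a ≥ 281 ∧ a ≤ 300) from by omega)]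
    rw [if_neg (show ¬(a ≥ 261 ∧ a ≤ 280) from by omega)]
    rw [if_neg (show ¬(a ≥ 241 ∧ a ≤ 260) from by omega)]
    rw [if_neg (show ¬(a ≥ 221 ∧ a ≤ 240) from by omega)]
    rw [if_neg (show ¬(a ≥ 201 ∧ a ≤ 220) from by omega)]
    rw [if_neg (show ¬(a ≥ 181 ∧ a ≤ 200) from by omega)]
    rw [if_neg (show ¬(a ≥ 161 ∧ a ≤ 180) from by omega)]
    rw [if_neg (show ¬(a ≥ 141 ∧ a ≤ 160) from by omega)]
    rw [if_neg (show ¬(a ≥ 121 ∧ a ≤ 140) from by omega)]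
    rw [if_neg (show ¬(a ≥ 101 ∧ a ≤ 120) from by omega)]
    rw [if_pos (show a ≥ 81 ∧ a ≤ 100 from by omega), if_pos (show (0:Int) ≤ (4:Int) ∧ (4:Int) < 19 from by decide)]
    rfl
  · simp only [pvClassA, pvClassB, hdiv, show (a-1)/20 = (5:Int) from by omega]
    rw [if_neg (show ¬(a ≥ 361 ∧ a ≤ 380) from by omega)]
    rw [if_neg (show ¬(a ≥ 341 ∧ a ≤ 360) from by omega)]
    rw [if_neg (show ¬(a ≥ 321 ∧ a ≤ 340) from by omega)]
    rw [if_neg (show ¬(a ≥ 301 ∧ a ≤ 320) from by omega)]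
    rw [if_neg (show ¬(a ≥ 281 ∧ a ≤ 300) from by omega)]
    rw [if_neg (show ¬(a ≥ 261 ∧ a ≤ 280) from by omega)]
    rw [if_neg (show ¬(a ≥ 241 ∧ a ≤ 260) from by omega)]
    rw [if_neg (show ¬(a ≥ 221 ∧ a ≤ 240) from by omega)]
    rw [if_neg (show ¬(a ≥ 201 ∧ a ≤ 220) from by omega)]
    rw [if_neg (show ¬(a ≥ 181 ∧ a ≤ 200) from by omega)]
    rw [if_neg (show ¬(a ≥ 161 ∧ a ≤ 180) from by omega)]
    rw [if_neg (show ¬(a ≥ 141 ∧ a ≤ 160) from by omega)]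
    rw [if_neg (show ¬(a ≥ 121 ∧ a ≤ 140) from by omega)]
    rw [if_pos (show a ≥ 101 ∧ a ≤ 120 from by omega), if_pos (show (0:Int) ≤ (5:Int) ∧ (5:Int) < 19 from by decide)]
    rfl
  · simp only [pvClassA, pvClassB, hdiv, show (a-1)/20 = (6:Int) from by omega]
    rw [if_neg (show ¬(a ≥ 361 ∧ a ≤ 380) from by omega)]
    rw [if_neg (show ¬(a ≥ 341 ∧ a ≤ 360) from by omega)]
    rw [if_neg (show ¬(a ≥ 321 ∧ a ≤ 340) from by omega)]
    rw [if_neg (show ¬(a ≥ 301 ∧ a ≤ 320) from by omega)]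
    rw [if_neg (show ¬(a ≥ 281 ∧ a ≤ 300) from by omega)]
    rw [if_neg (show ¬(a ≥ 261 ∧ a ≤ 280) from by omega)]
    rw [if_neg (show ¬(a ≥ 241 ∧ a ≤ 260) from by omega)]
    rw [if_neg (show ¬(a ≥ 221 ∧ a ≤ 240) from by omega)]
    rw [if_neg (show ¬(a ≥ 201 ∧ a ≤ 220) from by omega)]
    rw [if_neg (show ¬(a ≥ 181 ∧ a ≤ 200) from by omega)]
    rw [if_neg (show ¬(a ≥ 161 ∧ a ≤ 180) from by omega)]
    rw [if_neg (show ¬(a ≥ 141 ∧ a ≤ 160) from by omega)]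
    rw [if_pos (show a ≥ 121 ∧ a ≤ 140 from by omega), if_pos (show (0:Int) ≤ (6:Int) ∧ (6:Int) < 19 from by decide)]
    rfl
  · simp only [pvClassA, pvClassB, hdiv, show (a-1)/20 = (7:Int) from by omega]
    rw [if_neg (show ¬(a ≥ 361 ∧ a ≤ 380) from by omega)]
    rw [if_neg (show ¬(a ≥ 341 ∧ a ≤ 360) from by omega)]
    rw [if_neg (show ¬(a ≥ 321 ∧ a ≤ 340) from by omega)]
    rw [if_neg (show ¬(a ≥ 301 ∧ a ≤ 320) from by omega)]
    rw [if_neg (show ¬(a ≥ 281 ∧ a ≤ 300) from by omega)]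
    rw [if_neg (show ¬(a ≥ 261 ∧ a ≤ 280) from by omega)]
    rw [if_neg (show ¬(a ≥ 241 ∧ a ≤ 260) from by omega)]
    rw [if_neg (show ¬(a ≥ 221 ∧ a ≤ 240) from by omega)]
    rw [if_neg (show ¬(a ≥ 201 ∧ a ≤ 220) from by omega)]
    rw [if_neg (show ¬(a ≥ 181 ∧ a ≤ 200) from by omega)]
    rw [if_neg (show ¬(a ≥ 161 ∧ a ≤ 180) from by omega)]
    rw [if_pos (show a ≥ 141 ∧ a ≤ 160 from by omega), if_pos (show (0:Int) ≤ (7:Int) ∧ (7:Int) < 19 from by decide)]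
    rfl
  · simp only [pvClassA, pvClassB, hdiv, show (a-1)/20 = (8:Int) from by omega]
    rw [if_neg (show ¬(a ≥ 361 ∧ a ≤ 380) from by omega)]
    rw [if_neg (show ¬(a ≥ 341 ∧ a ≤ 360) from by omega)]
    rw [if_neg (show ¬(a ≥ 321 ∧ a ≤ 340) from by omega)]
    rw [if_neg (show ¬(a ≥ 301 ∧ a ≤ 320) from by omega)]
    rw [if_neg (show ¬(a ≥ 281 ∧ a ≤ 300) from by omega)]
    rw [if_neg (show ¬(a ≥ 261 ∧ a ≤ 280) from by omega)]
    rw [if_neg (show ¬(a ≥ 241 ∧ a ≤ 260) from by omega)]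
    rw [if_neg (show ¬(a ≥ 221 ∧ a ≤ 240) from by omega)]
    rw [if_neg (show ¬(a ≥ 201 ∧ a ≤ 220) from by omega)]
    rw [if_neg (show ¬(a ≥ 181 ∧ a ≤ 200) from by omega)]
    rw [if_pos (show a ≥ 161 ∧ a ≤ 180 from by omega), if_pos (show (0:Int) ≤ (8:Int) ∧ (8:Int) < 19 from by decide)]
    rfl
  · simp only [pvClassA, pvClassB, hdiv, show (a-1)/20 = (9:Int) from by omega]
    rw [if_neg (show ¬(a ≥ 361 ∧ a ≤ 380) from by omega)]
    rw [if_neg (show ¬(a ≥ 341 ∧ a ≤ 360) from by omega)]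
    rw [if_neg (show ¬(a ≥ 321 ∧ a ≤ 340) from by omega)]
    rw [if_neg (show ¬(a ≥ 301 ∧ a ≤ 320) from by omega)]
    rw [if_neg (show ¬(a ≥ 281 ∧ a ≤ 300) from by omega)]
    rw [if_neg (show ¬(a ≥ 261 ∧ a ≤ 280) from by omega)]
    rw [if_neg (show ¬(a ≥ 241 ∧ a ≤ 260) from by omega)]
    rw [if_neg (show ¬(a ≥ 221 ∧ a ≤ 240) from by omega)]
    rw [if_neg (show ¬(a ≥ 201 ∧ a ≤ 220) from by omega)]
    rw [if_pos (show a ≥ 181 ∧ a ≤ 200 from by omega), if_pos (show (0:Int) ≤ (9:Int) ∧ (9:Int) < 19 from by decide)]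
    rfl
  · simp only [pvClassA, pvClassB, hdiv, show (a-1)/20 = (10:Int) from by omega]
    rw [if_neg (show ¬(a ≥ 361 ∧ a ≤ 380) from by omega)]
    rw [if_neg (show ¬(a ≥ 341 ∧ a ≤ 360) from by omega)]
    rw [if_neg (show ¬(a ≥ 321 ∧ a ≤ 340) from by omega)]
    rw [if_neg (show ¬(a ≥ 301 ∧ a ≤ 320) from by omega)]
    rw [if_neg (show ¬(a ≥ 281 ∧ a ≤ 300) from by omega)]
    rw [if_neg (show ¬(a ≥ 261 ∧ a ≤ 280) from by omega)]
    rw [if_neg (show ¬(a ≥ 241 ∧ a ≤ 260) from by omega)]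
    rw [if_neg (show ¬(a ≥ 221 ∧ a ≤ 240) from by omega)]
    rw [if_pos (show a ≥ 201 ∧ a ≤ 220 from by omega), if_pos (show (0:Int) ≤ (10:Int) ∧ (10:Int) < 19 from by decide)]
    rfl
  · simp only [pvClassA, pvClassB, hdiv, show (a-1)/20 = (11:Int) from by omega]
    rw [if_neg (show ¬(a ≥ 361 ∧ a ≤ 380) from by omega)]
    rw [if_neg (show ¬(a ≥ 341 ∧ a ≤ 360) from by omega)]
    rw [if_neg (show ¬(a ≥ 321 ∧ a ≤ 340) from by omega)]
    rw [if_neg (show ¬(a ≥ 301 ∧ a ≤ 320) from by omega)]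
    rw [if_neg (show ¬(a ≥ 281 ∧ a ≤ 300) from by omega)]
    rw [if_neg (show ¬(a ≥ 261 ∧ a ≤ 280) from by omega)]
    rw [if_neg (show ¬(a ≥ 241 ∧ a ≤ 260) from by omega)]
    rw [if_pos (show a ≥ 221 ∧ a ≤ 240 from by omega), if_pos (show (0:Int) ≤ (11:Int) ∧ (11:Int) < 19 from by decide)]
    rfl
  · simp only [pvClassA, pvClassB, hdiv, show (a-1)/20 = (12:Int) from by omega]
    rw [if_neg (show ¬(a ≥ 361 ∧ a ≤ 380) from by omega)]
    rw [if_neg (show ¬(a ≥ 341 ∧ a ≤ 360) from by omega)]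
    rw [if_neg (show ¬(a ≥ 321 ∧ a ≤ 340) from by omega)]
    rw [if_neg (show ¬(a ≥ 301 ∧ a ≤ 320) from by omega)]
    rw [if_neg (show ¬(a ≥ 281 ∧ a ≤ 300) from by omega)]
    rw [if_neg (show ¬(a ≥ 261 ∧ a ≤ 280) from by omega)]
    rw [if_pos (show a ≥ 241 ∧ a ≤ 260 from by omega), if_pos (show (0:Int) ≤ (12:Int) ∧ (12:Int) < 19 from by decide)]
    rfl
  · simp only [pvClassA, pvClassB, hdiv, show (a-1)/20 = (13:Int) from by omega]
    rw [if_neg (show ¬(a ≥ 361 ∧ a ≤ 380) from by omega)]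
    rw [if_neg (show ¬(a ≥ 341 ∧ a ≤ 360) from by omega)]
    rw [if_neg (show ¬(a ≥ 321 ∧ a ≤ 340) from by omega)]
    rw [if_neg (show ¬(a ≥ 301 ∧ a ≤ 320) from by omega)]
    rw [if_neg (show ¬(a ≥ 281 ∧ a ≤ 300) from by omega)]
    rw [if_pos (show a ≥ 261 ∧ a ≤ 280 from by omega), if_pos (show (0:Int) ≤ (13:Int) ∧ (13:Int) < 19 from by decide)]
    rfl
  · simp only [pvClassA, pvClassB, hdiv, show (a-1)/20 = (14:Int) from by omega]
    rw [if_neg (show ¬(a ≥ 361 ∧ a ≤ 380) from by omega)]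
    rw [if_neg (show ¬(a ≥ 341 ∧ a ≤ 360) from by omega)]
    rw [if_neg (show ¬(a ≥ 321 ∧ a ≤ 340) from by omega)]
    rw [if_neg (show ¬(a ≥ 301 ∧ a ≤ 320) from by omega)]
    rw [if_pos (show a ≥ 281 ∧ a ≤ 300 from by omega), if_pos (show (0:Int) ≤ (14:Int) ∧ (14:Int) < 19 from by decide)]
    rfl
  · simp only [pvClassA, pvClassB, hdiv, show (a-1)/20 = (15:Int) from by omega]
    rw [if_neg (show ¬(a ≥ 361 ∧ a ≤ 380) from by omega)]
    rw [if_neg (show ¬(a ≥ 341 ∧ a ≤ 360) from by omega)]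
    rw [if_neg (show ¬(a ≥ 321 ∧ a ≤ 340) from by omega)]
    rw [if_pos (show a ≥ 301 ∧ a ≤ 320 from by omega), if_pos (show (0:Int) ≤ (15:Int) ∧ (15:Int) < 19 from by decide)]
    rfl
  · simp only [pvClassA, pvClassB, hdiv, show (a-1)/20 = (16:Int) from by omega]
    rw [if_neg (show ¬(a ≥ 361 ∧ a ≤ 380) from by omega)]
    rw [if_neg (show ¬(a ≥ 341 ∧ a ≤ 360) from by omega)]
    rw [if_pos (show a ≥ 321 ∧ a ≤ 340 from by omega), if_pos (show (0:Int) ≤ (16:Int) ∧ (16:Int) < 19 from by decide)]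
    rfl
  · simp only [pvClassA, pvClassB, hdiv, show (a-1)/20 = (17:Int) from by omega]
    rw [if_neg (show ¬(a ≥ 361 ∧ a ≤ 380) from by omega)]
    rw [if_pos (show a ≥ 341 ∧ a ≤ 360 from by omega), if_pos (show (0:Int) ≤ (17:Int) ∧ (17:Int) < 19 from by decide)]
    rfl
  · simp only [pvClassA, pvClassB, hdiv, show (a-1)/20 = (18:Int) from by omega]
    rw [if_pos (show a ≥ 361 ∧ a ≤ 380 from by omega), if_pos (show (0:Int) ≤ (18:Int) ∧ (18:Int) < 19 from by decide)]
    rfl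

theorem troca_numero_classe_spec : Claim_equal_troca_numero_classe := by
  intro lista _ hpre
  unfold Pre_troca_numero_classe at hpre
  simp only [List.all_eq_true, Bool.and_eq_true, decide_eq_true_eq] at hpre
  unfold Spec_troca_numero_classe troca_numero_classe troca_numero_classe_alt
  exact List.map_congr_left (fun a ha => pvClass_eq a (hpre a ha).1 (hpre a ha).2)
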